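-- pv_equiv track=rewrite | github.com/chboishabba/SensibLaw | src/text/lexeme_normalizer.py | _case_flags
-- ===== SOURCE A (Python) =====
-- from enum import IntFlag
--
-- class LexemeFlags(IntFlag):
--     NONE = 0
--
--     SURF_ALL_UPPER = 1 << 0
--     SURF_ALL_LOWER = 1 << 1
--     SURF_TITLE = 1 << 2
--     SURF_MIXED_CASE = 1 << 3
--
--     HAS_NON_ASCII = 1 << 4
--     HAS_LETTER = 1 << 5
--     HAS_DIGIT = 1 << 6
--     HAS_PUNCT = 1 << 7
--     HAS_SYMBOL = 1 << 8
--
--     HAS_REPLACEMENT_CHAR = 1 << 9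
--     HAS_ZERO_WIDTH = 1 << 10
--
-- def _case_flags(surface: str) -> int:
--     letters = [ch for ch in surface if ch.isalpha()]
--     if not letters:
--         return 0
--
--     if all(ch.isupper() for ch in letters):
--         return int(LexemeFlags.SURF_ALL_UPPER)
--     if all(ch.islower() for ch in letters):
--         return int(LexemeFlags.SURF_ALL_LOWER)
--
--     first_index = next((i for i, ch in enumerate(surface) if ch.isalpha()), None)
--     if first_index is not None:
--         first = surface[first_index]
--         rest = [ch for ch in surface[first_index + 1 :] if ch.isalpha()]
--         if first.isupper() and all(ch.islower() for ch in rest):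
--             return int(LexemeFlags.SURF_TITLE)
--
--     return int(LexemeFlags.SURF_MIXED_CASE)
-- ===== SOURCE B (Python) =====
-- def _case_flags(surface: str) -> int:
--     has_letter = False
--     all_upper = True
--     all_lower = True
--     first_upper = False
--     rest_lower = True
--     for ch in surface:
--         if ch.isalpha():
--             if not has_letter:
--                 has_letter = True
--                 first_upper = ch.isupper()
--                 all_upper = ch.isupper()
--                 all_lower = ch.islower()
--             else:
--                 all_upper = all_upper and ch.isupper()
--                 all_lower = all_lower and ch.islower()
--                 rest_lower = rest_lower and ch.islower()
--     if not has_letter: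
--         return 0
--     if all_upper:
--         return 1
--     if all_lower:
--         return 2
--     if first_upper and rest_lower:
--         return 4
--     return 8
-- ===== Notes on version B (the rewrite author's own statement) =====
-- stated objective: alternative
-- what changed: Replaced A's multiple passes (filter, two all() scans, enumerate search, slice+filter) by a single loop over surface maintaining has_letter/all_upper/all_lower/first_upper/rest_lower flags.
import Mathlib
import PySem

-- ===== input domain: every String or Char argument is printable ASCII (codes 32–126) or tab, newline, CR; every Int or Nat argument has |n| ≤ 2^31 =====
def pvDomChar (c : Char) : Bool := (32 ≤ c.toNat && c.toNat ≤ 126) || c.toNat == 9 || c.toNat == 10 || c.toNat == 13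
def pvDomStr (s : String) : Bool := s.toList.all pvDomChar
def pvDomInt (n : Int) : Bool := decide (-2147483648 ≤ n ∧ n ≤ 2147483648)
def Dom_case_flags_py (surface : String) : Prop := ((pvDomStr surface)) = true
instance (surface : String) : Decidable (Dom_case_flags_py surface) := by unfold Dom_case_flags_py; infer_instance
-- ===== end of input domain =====

-- B replaces A's multiple passes (filter + two all() scans + enumerate search + slice/filter)
-- by one loop over the string maintaining five case flags (objective: alternative single-pass algorithm).

-- ===== PORT A =====
-- port of `next((i for i, ch in enumerate(surface) if ch.isalpha()), None)`
def findAlphaIdx : List Char → Int → Option Int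
  | [], _ => none
  | c :: cs, i => if PySem.Chars.isalpha c then some i else findAlphaIdx cs (i + 1)

def case_flags_py (surface : String) : Int :=
  let letters := surface.toList.filter (fun ch => PySem.Chars.isalpha ch)
  if letters = [] then 0
  else if letters.all (fun ch => PySem.Chars.isupper ch) then 1
  else if letters.all (fun ch => PySem.Chars.islower ch) then 2
  else
    match findAlphaIdx surface.toList 0 with
    | some i =>
        match PySem.Str.pyGet? surface i with
        | some first =>
            let rest := (PySem.List.slice surface.toList (some (i + 1)) none).filter
              (fun ch => PySem.Chars.isalpha ch)
            if PySem.Chars.isupper first && rest.all (fun ch => PySem.Chars.islower ch) then 4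
            else 8
        | none => 8  -- unreachable: first_index is a valid index of surface
    | none => 8  -- Python's `if first_index is not None` fall-through

-- ===== PORT B =====
-- loop body of Source B: state = (has_letter, all_upper, all_lower, first_upper, rest_lower)
def bStep (st : Bool × Bool × Bool × Bool × Bool) (ch : Char) : Bool × Bool × Bool × Bool × Bool :=
  let (hasL, allU, allL, firstU, restL) := st
  if PySem.Chars.isalpha ch then
    if !hasL then
      (true, PySem.Chars.isupper ch, PySem.Chars.islower ch, PySem.Chars.isupper ch, restL)
    else
      (true, allU && PySem.Chars.isupper ch, allL && PySem.Chars.islower ch, firstU,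
        restL && PySem.Chars.islower ch)
  else st

def case_flags_py_alt (surface : String) : Int :=
  let st := surface.toList.foldl bStep (false, true, true, false, true)
  if !st.1 then 0
  else if st.2.1 then 1
  else if st.2.2.1 then 2
  else if st.2.2.2.1 && st.2.2.2.2 then 4
  else 8

-- ===== PRECONDITION & SPEC =====
def Spec_case_flags_py (surface : String) (out : Int) : Prop := out = case_flags_py_alt surface
instance (surface : String) (out : Int) : Decidable (Spec_case_flags_py surface out) := by unfold Spec_case_flags_py; infer_instance

-- ===== CLAIM (what is proved, stated in full; the proofs are below) =====
def Claim_equal_case_flags_py : Prop := ∀ (surface : String), Dom_case_flags_py surface → Spec_case_flags_py surface (case_flags_py surface)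

-- ===== LEMMAS AND PROOFS =====

theorem findAlphaIdx_spec (cs : List Char) (i0 : Int) (f : Char) (r : List Char)
    (h : cs.filter (fun ch => PySem.Chars.isalpha ch) = f :: r) :
    ∃ k : Nat, findAlphaIdx cs i0 = some (i0 + (k : Int)) ∧ cs[k]? = some f ∧
      (cs.drop (k + 1)).filter (fun ch => PySem.Chars.isalpha ch) = r := by
  induction cs generalizing i0 with
  | nil => simp at h
  | cons c cs ih =>
    by_cases hc : PySem.Chars.isalpha c = true
    · simp [hc] at h
      refine ⟨0, ?_, ?_, ?_⟩
      · simp [findAlphaIdx, hc]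
      · simp [h.1]
      · simpa using h.2
    · simp only [List.filter_cons, hc, if_neg, Bool.false_eq_true, not_false_eq_true] at h
      obtain ⟨k, h1, h2, h3⟩ := ih (i0 + 1) h
      refine ⟨k + 1, ?_, ?_, ?_⟩
      · simp [findAlphaIdx, hc, h1]; ring
      · simpa using h2
      · simpa using h3

theorem foldB_started (cs : List Char) (aU aL fU rL : Bool) :
    List.foldl bStep (true, aU, aL, fU, rL) cs =
      (true, aU && (cs.filter (fun ch => PySem.Chars.isalpha ch)).all (fun ch => PySem.Chars.isupper ch),
        aL && (cs.filter (fun ch => PySem.Chars.isalpha ch)).all (fun ch => PySem.Chars.islower ch), fU,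
        rL && (cs.filter (fun ch => PySem.Chars.isalpha ch)).all (fun ch => PySem.Chars.islower ch)) := by
  induction cs generalizing aU aL rL with
  | nil => simp
  | cons c cs ih =>
    by_cases hc : PySem.Chars.isalpha c = true
    · simp [bStep, hc, ih, Bool.and_assoc]
    · simp [bStep, hc, ih]

theorem foldB_init (cs : List Char) (f : Char) (r : List Char)
    (h : cs.filter (fun ch => PySem.Chars.isalpha ch) = f :: r) :
    List.foldl bStep (false, true, true, false, true) cs =
      (true, PySem.Chars.isupper f && r.all (fun ch => PySem.Chars.isupper ch),
        PySem.Chars.islower f && r.all (fun ch => PySem.Chars.islower ch),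
        PySem.Chars.isupper f, r.all (fun ch => PySem.Chars.islower ch)) := by
  induction cs with
  | nil => simp at h
  | cons c cs ih =>
    by_cases hc : PySem.Chars.isalpha c = true
    · simp [hc] at h
      obtain ⟨hf, hr⟩ := h
      subst hf
      simp [bStep, hc, foldB_started, hr]
    · simp only [List.filter_cons, hc, Bool.false_eq_true, not_false_eq_true, if_neg] at h
      simp [bStep, hc, ih h]

theorem foldB_none (cs : List Char)
    (h : cs.filter (fun ch => PySem.Chars.isalpha ch) = []) :
    List.foldl bStep (false, true, true, false, true) cs = (false, true, true, false, true) := by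
  induction cs with
  | nil => rfl
  | cons c cs ih =>
    by_cases hc : PySem.Chars.isalpha c = true
    · simp [hc] at h
    · simp only [List.filter_cons, hc, Bool.false_eq_true, not_false_eq_true, if_neg] at h
      simp [bStep, hc, ih h]

-- ===== VERDICT (by name: the statement is the Claim_ definition above) =====
theorem case_flags_py_spec : Claim_equal_case_flags_py := by
  intro surface _
  unfold Spec_case_flags_py case_flags_py case_flags_py_alt
  cases hlet : surface.toList.filter (fun ch => PySem.Chars.isalpha ch) with
  | nil => simp [foldB_none surface.toList hlet]
  | cons f r =>
    have hB := foldB_init surface.toList f r hlet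
    obtain ⟨k, h1, h2, h3⟩ := findAlphaIdx_spec surface.toList 0 f r hlet
    simp only [zero_add] at h1
    simp only [hB, h1, List.all_cons, PySem.Str.pyGet?_natCast, h2,
      ← Nat.cast_add_one, PySem.List.slice_from_natCast, h3]
    simp
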